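-- pv_equiv track=rewrite | github.com/tbattista/Fantasy-Weekly-AI-Notes | app/depth_chart_parser.py | get_player_team
-- ===== SOURCE A (Python) =====
-- from typing import Dict, List, Optional, Tuple
--
-- def normalize_player_name(name: str) -> str:
--     """
--     Normalize player name for comparison (remove suffixes, lowercase, etc.).
--
--     Args:
--         name: Player name to normalize
--
--     Returns:
--         Normalized player name
--     """
--     # Remove common suffixes
--     name = name.replace(' Jr.', '').replace(' Sr.', '').replace(' III', '').replace(' II', '')
--     # Remove extra whitespace and convert to lowercase
--     return ' '.join(name.split()).lower()
--
-- def get_player_team(player_name: str, depth_chart: Dict[str, Dict[str, List[str]]]) -> Optional[str]: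
--     """
--     Look up a player's current team from depth chart.
--
--     Args:
--         player_name: Name of the player to look up
--         depth_chart: Parsed depth chart data
--
--     Returns:
--         Team name if found, None otherwise
--     """
--     normalized_search = normalize_player_name(player_name)
--
--     for team, positions in depth_chart.items():
--         for position, players in positions.items():
--             for player in players:
--                 if normalize_player_name(player) == normalized_search:
--                     return team
--
--     return None
-- ===== SOURCE B (Python) =====
-- def normalize_player_name(name: str) -> str:
--     name = name.replace(' Jr.', '').replace(' Sr.', '').replace(' III', '').replace(' II', '')
--     return ' '.join(name.split()).lower()
--
-- def get_player_team(player_name, depth_chart):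
--     index = {}
--     for team, positions in depth_chart.items():
--         for position, players in positions.items():
--             for player in players:
--                 index.setdefault(normalize_player_name(player), team)
--     return index.get(normalize_player_name(player_name))
-- ===== Notes on version B (the rewrite author's own statement) =====
-- stated objective: alternative
-- what changed: Replaces the nested scan-with-early-return by building a first-occurrence-wins index dict over all players once, then a single dict lookup of the normalized search name.
import Mathlib
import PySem

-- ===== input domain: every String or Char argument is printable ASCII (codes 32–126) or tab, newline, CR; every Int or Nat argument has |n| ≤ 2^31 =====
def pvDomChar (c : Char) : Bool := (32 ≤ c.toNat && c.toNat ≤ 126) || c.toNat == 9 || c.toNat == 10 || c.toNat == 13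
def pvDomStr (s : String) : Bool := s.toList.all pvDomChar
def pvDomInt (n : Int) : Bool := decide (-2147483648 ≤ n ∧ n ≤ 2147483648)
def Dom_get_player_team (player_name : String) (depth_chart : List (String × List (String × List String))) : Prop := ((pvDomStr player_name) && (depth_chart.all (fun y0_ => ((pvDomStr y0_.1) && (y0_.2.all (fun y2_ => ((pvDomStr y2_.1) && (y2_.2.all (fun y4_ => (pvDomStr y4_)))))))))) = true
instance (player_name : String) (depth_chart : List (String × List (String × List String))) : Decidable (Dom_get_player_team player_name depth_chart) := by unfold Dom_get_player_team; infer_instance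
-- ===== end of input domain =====

-- ===== PORT A =====
-- ' '.join(name.split()).lower() after suffix removal, exactly as Python's chained replace
def pvNormalize (name : String) : String :=
  let n := PySem.Str.replace (PySem.Str.replace (PySem.Str.replace (PySem.Str.replace name " Jr." "") " Sr." "") " III" "") " II" ""
  PySem.Str.lower (PySem.Str.join " " (PySem.Str.split₀ n))

def pvScanPlayers (norm team : String) : List String → Option String
  | [] => none
  | p :: ps => if pvNormalize p == norm then some team else pvScanPlayers norm team ps

def pvScanPositions (norm team : String) : List (String × List String) → Option String
  | [] => none
  | pp :: rest =>
    match pvScanPlayers norm team pp.2 with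
    | some t => some t
    | none => pvScanPositions norm team rest

def pvScanTeams (norm : String) : List (String × List (String × List String)) → Option String
  | [] => none
  | tp :: rest =>
    match pvScanPositions norm tp.1 tp.2 with
    | some t => some t
    | none => pvScanTeams norm rest

def get_player_team (player_name : String) (depth_chart : List (String × List (String × List String))) : Option String :=
  pvScanTeams (pvNormalize player_name) depth_chart

-- ===== PORT B =====
-- B: build a first-occurrence-wins index (dict.setdefault) over every player, then one lookup
def pvBuildIndex (depth_chart : List (String × List (String × List String))) : PySem.Dict String String :=
  depth_chart.foldl (fun d tp =>
    tp.2.foldl (fun d pp =>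
      pp.2.foldl (fun d p => d.setdefault (pvNormalize p) tp.1) d) d) PySem.Dict.empty

def get_player_team_alt (player_name : String) (depth_chart : List (String × List (String × List String))) : Option String :=
  (pvBuildIndex depth_chart).get? (pvNormalize player_name)

-- ===== PRECONDITION & SPEC =====
def Spec_get_player_team (player_name : String) (depth_chart : List (String × List (String × List String))) (out : Option String) : Prop := out = get_player_team_alt player_name depth_chart
instance (player_name : String) (depth_chart : List (String × List (String × List String))) (out : Option String) : Decidable (Spec_get_player_team player_name depth_chart out) := by unfold Spec_get_player_team; infer_instance

-- ===== CLAIM (what is proved, stated in full; the proofs are below) =====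
def Claim_equal_get_player_team : Prop := ∀ (player_name : String) (depth_chart : List (String × List (String × List String))), Dom_get_player_team player_name depth_chart → Spec_get_player_team player_name depth_chart (get_player_team player_name depth_chart)

-- ===== LEMMAS AND PROOFS =====
theorem pvGet_foldl_players (k team : String) (players : List String) (d : PySem.Dict String String) :
    (players.foldl (fun d p => d.setdefault (pvNormalize p) team) d).get? k
      = (d.get? k).or (pvScanPlayers k team players) := by
  induction players generalizing d with
  | nil => cases h : d.get? k <;> simp [pvScanPlayers, h]
  | cons p ps ih =>
    simp only [List.foldl_cons, ih, pvScanPlayers]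
    by_cases he : pvNormalize p = k
    · subst he
      rw [PySem.Dict.get?_setdefault_self]
      cases h : d.get? (pvNormalize p) <;> simp
    · have hne : k ≠ pvNormalize p := fun h => he h.symm
      have : (d.setdefault (pvNormalize p) team).get? k = d.get? k := by
        by_cases hc : d.contains (pvNormalize p) = true
        · rw [PySem.Dict.setdefault_of_contains _ _ hc]
        · rw [PySem.Dict.setdefault_of_not_contains _ _ (by simpa using hc),
              PySem.Dict.get?_insert_of_ne _ _ hne]
      rw [this]
      simp [he]

theorem pvGet_foldl_positions (k team : String) (positions : List (String × List String))
    (d : PySem.Dict String String) :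
    (positions.foldl (fun d pp => pp.2.foldl (fun d p => d.setdefault (pvNormalize p) team) d) d).get? k
      = (d.get? k).or (pvScanPositions k team positions) := by
  induction positions generalizing d with
  | nil => cases h : d.get? k <;> simp [pvScanPositions, h]
  | cons pp rest ih =>
    simp only [List.foldl_cons, ih, pvGet_foldl_players, Option.or_assoc, pvScanPositions]
    cases pvScanPlayers k team pp.2 <;> simp

theorem pvGet_foldl_teams (k : String) (dc : List (String × List (String × List String)))
    (d : PySem.Dict String String) :
    (dc.foldl (fun d tp => tp.2.foldl (fun d pp => pp.2.foldl (fun d p => d.setdefault (pvNormalize p) tp.1) d) d) d).get? k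
      = (d.get? k).or (pvScanTeams k dc) := by
  induction dc generalizing d with
  | nil => cases h : d.get? k <;> simp [pvScanTeams, h]
  | cons tp rest ih =>
    simp only [List.foldl_cons, ih, pvGet_foldl_positions, Option.or_assoc, pvScanTeams]
    cases pvScanPositions k tp.1 tp.2 <;> simp

-- ===== VERDICT (by name: the statement is the Claim_ definition above) =====
theorem get_player_team_spec : Claim_equal_get_player_team := by
  intro pn dc _
  unfold Spec_get_player_team get_player_team get_player_team_alt pvBuildIndex
  rw [pvGet_foldl_teams]
  simp
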